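-- pv_equiv track=rewrite | github.com/open-compass/VLMEvalKit | vlmeval/dataset/mindcubebench.py | build_msgs
-- ===== SOURCE A (Python) =====
-- def build_msgs(tgt_path, prompt):
--     """
--     Interlaced text and pictures
--     """
--     images = tgt_path if isinstance(tgt_path, list) else [tgt_path]
--
--     parts = prompt.split('<image>')
--     segs = []
--
--     for i, part in enumerate(parts):
--         part = part.strip()
--         if part:
--             segs.append(dict(type='text', value=part))
--         if (i != len(parts) - 1) and (i < len(images)):
--             segs.append(dict(type='image', value=images[i]))
--
--     return [s for s in segs if s['value']]
-- ===== SOURCE B (Python) =====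
-- def build_msgs(tgt_path, prompt):
--     """
--     Interlaced text and pictures
--     """
--     images = tgt_path if isinstance(tgt_path, list) else [tgt_path]
--     parts = prompt.split('<image>')
--
--     def interleave(ps, ims):
--         # raw token stream: every part emits a text token; every part except the
--         # last emits the paired image token while images remain
--         if not ps:
--             return []
--         if len(ps) == 1:
--             return [('text', ps[0])]
--         if not ims:
--             return [('text', ps[0])] + interleave(ps[1:], ims)
--         return [('text', ps[0]), ('image', ims[0])] + interleave(ps[1:], ims[1:])
--
--     tokens = interleave(parts, images)
--     # strip text values and drop falsy values in one deferred pass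
--     return [{'type': t, 'value': v.strip() if t == 'text' else v}
--             for (t, v) in tokens
--             if (v.strip() if t == 'text' else v)]
-- ===== Notes on version B (the rewrite author's own statement) =====
-- stated objective: alternative
-- what changed: B first builds a raw interleaved token stream by structural recursion over the parts/images lists, emitting every text and paired image token unconditionally, and then performs all stripping and falsy-value filtering in one deferred comprehension, instead of A's single indexed loop that strips and conditionally appends per index and filters afterwards.
import Mathlib
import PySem

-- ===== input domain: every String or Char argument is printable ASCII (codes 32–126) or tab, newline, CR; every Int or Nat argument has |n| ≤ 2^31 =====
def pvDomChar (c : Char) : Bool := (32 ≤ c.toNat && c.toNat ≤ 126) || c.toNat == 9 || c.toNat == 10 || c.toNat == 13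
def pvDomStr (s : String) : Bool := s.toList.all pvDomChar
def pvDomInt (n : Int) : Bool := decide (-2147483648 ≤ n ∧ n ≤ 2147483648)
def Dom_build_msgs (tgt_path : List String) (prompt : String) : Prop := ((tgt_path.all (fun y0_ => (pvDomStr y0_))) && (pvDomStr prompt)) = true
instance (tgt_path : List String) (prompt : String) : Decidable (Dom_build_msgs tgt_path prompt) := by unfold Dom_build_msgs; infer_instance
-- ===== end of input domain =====

-- B builds the raw interleaved (type, value) token stream by structural recursion over the
-- parts/images lists, emitting every token unconditionally, and does all stripping and
-- falsy-value filtering in one deferred pass (objective: alternative decomposition).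

-- ===== PORT A =====
-- dicts are association lists [("type",…),("value",…)]; s['value'] is the first-match
-- lookup (the key is always present, so the getD default is never used);
-- prompt.split('<image>') is PySem.Str.split? with a non-empty literal separator, so it is
-- always `some` and the getD [] default is never used;
-- images[i] is PySem.List.pyGetD (the guard i < len(images) keeps the index in range, so it is exact)
def build_msgs (tgt_path : List String) (prompt : String) : List (List (String × String)) :=
  let images := tgt_path
  let parts := (PySem.Str.split? prompt "<image>").getD []
  let segs := (PySem.List.enumerate parts).foldl
    (fun segs ip =>
      let i := ip.1
      let part := PySem.Str.strip ip.2
      let segs := if part ≠ "" then segs ++ [[("type", "text"), ("value", part)]] else segs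
      if i ≠ (parts.length : Int) - 1 ∧ i < (images.length : Int) then
        segs ++ [[("type", "image"), ("value", PySem.List.pyGetD images i "")]]
      else segs) []
  segs.filter (fun s => ((List.lookup "value" s).getD "") ≠ "")

-- ===== PORT B =====
-- Source B's inner `interleave`, a structural recursion over the two lists
def bmIleave : List String → List String → List (String × String)
  | [], _ => []
  | [p], _ => [("text", p)]
  | p :: q :: ps, [] => ("text", p) :: bmIleave (q :: ps) []
  | p :: q :: ps, l :: ls => ("text", p) :: ("image", l) :: bmIleave (q :: ps) ls

-- the final comprehension: condition first (filter), then the dict expression (map)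
def build_msgs_alt (tgt_path : List String) (prompt : String) : List (List (String × String)) :=
  let images := tgt_path
  let parts := (PySem.Str.split? prompt "<image>").getD []
  let tokens := bmIleave parts images
  (tokens.filter (fun tv => (if tv.1 == "text" then PySem.Str.strip tv.2 else tv.2) ≠ "")).map
    (fun tv => [("type", tv.1), ("value", if tv.1 == "text" then PySem.Str.strip tv.2 else tv.2)])

-- ===== PRECONDITION & SPEC =====
def Spec_build_msgs (tgt_path : List String) (prompt : String) (out : List (List (String × String))) : Prop := out = build_msgs_alt tgt_path prompt
instance (tgt_path : List String) (prompt : String) (out : List (List (String × String))) : Decidable (Spec_build_msgs tgt_path prompt out) := by unfold Spec_build_msgs; infer_instance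

-- ===== CLAIM (what is proved, stated in full; the proofs are below) =====
def Claim_equal_build_msgs : Prop := ∀ (tgt_path : List String) (prompt : String), Dom_build_msgs tgt_path prompt → Spec_build_msgs tgt_path prompt (build_msgs tgt_path prompt)

-- ===== LEMMAS AND PROOFS =====

/-- text segment produced from a (stripped, non-empty) part -/
def tDict (v : String) : List (String × String) := [("type", "text"), ("value", v)]
/-- image segment -/
def iDict (v : String) : List (String × String) := [("type", "image"), ("value", v)]
/-- the (0 or 1) text segments a part contributes -/
def tOpt (p : String) : List (List (String × String)) :=
  if PySem.Str.strip p ≠ "" then [tDict (PySem.Str.strip p)] else []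
/-- the (0 or 1) image segments an image contributes after the truthiness filter -/
def iOpt (l : String) : List (List (String × String)) :=
  if l ≠ "" then [iDict l] else []

/-- common characterisation: interleave parts with images, no image after the last part -/
def inter : List String → List String → List (List (String × String))
  | [], _ => []
  | [p], _ => tOpt p
  | p :: q :: ps, [] => tOpt p ++ inter (q :: ps) []
  | p :: q :: ps, l :: ls => tOpt p ++ iOpt l ++ inter (q :: ps) ls

theorem filter_value_tOpt (p : String) :
    (if PySem.Str.strip p ≠ "" then [tDict (PySem.Str.strip p)] else []).filter
      (fun s => ((List.lookup "value" s).getD "") ≠ "") = tOpt p := by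
  by_cases h : PySem.Str.strip p = "" <;> simp [tOpt, tDict, List.filter, List.lookup, h]

theorem filter_value_iOpt (c : Prop) [Decidable c] (v : String) :
    (if c then [iDict v] else []).filter
      (fun s => ((List.lookup "value" s).getD "") ≠ "") =
    if c ∧ v ≠ "" then [iDict v] else [] := by
  by_cases h : c <;> by_cases hv : v = "" <;>
    simp [iDict, List.filter, List.lookup, h, hv]

/-- A-side core: the filtered flatMap over the enumeration is `inter`. -/
theorem enum_inter (L : List String) (parts : List String) (s : Nat) (n : Int)
    (hn : n = s + parts.length) :
    (PySem.List.enumerate parts (s : Int)).flatMap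
      (fun ip => tOpt ip.2 ++
        (if (ip.1 ≠ n - 1 ∧ ip.1 < (L.length : Int)) ∧ PySem.List.pyGetD L ip.1 "" ≠ "" then
          [iDict (PySem.List.pyGetD L ip.1 "")] else [])) = inter parts (L.drop s) := by
  induction parts generalizing s n with
  | nil => simp [PySem.List.enumerate_nil, inter]
  | cons p ps ih =>
    rw [PySem.List.enumerate_cons, List.flatMap_cons]
    have hrec : ((s : Int) + 1) = ((s + 1 : Nat) : Int) := by push_cast; ring
    cases ps with
    | nil =>
      have hcond : ¬ (((s:Int) ≠ n - 1 ∧ (s:Int) < (L.length : Int)) ∧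
          PySem.List.pyGetD L (s : Int) "" ≠ "") := by
        simp only [List.length_cons, List.length_nil] at hn
        intro h; exact h.1.1 (by omega)
      rw [if_neg hcond]
      simp [PySem.List.enumerate_nil, inter]
    | cons q ps' =>
      have hne : (s : Int) ≠ n - 1 := by
        simp only [List.length_cons] at hn; omega
      rw [hrec, ih (s + 1) n (by simp at hn ⊢; omega)]
      by_cases hs : s < L.length
      · have hdrop : L.drop s = L[s] :: L.drop (s + 1) :=
          (List.drop_eq_getElem_cons hs)
        have hget : PySem.List.pyGetD L (s : Int) "" = L[s] := by
          rw [PySem.List.pyGetD_natCast]; exact List.getD_eq_getElem L "" hs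
        rw [hdrop]
        by_cases hv : L[s] = ""
        · have : ¬ (((s:Int) ≠ n - 1 ∧ (s:Int) < (L.length : Int)) ∧
              PySem.List.pyGetD L (s : Int) "" ≠ "") := by
            rw [hget]; intro h; exact h.2 hv
          rw [if_neg this]
          simp [inter, iOpt, hv]
        · have : (((s:Int) ≠ n - 1 ∧ (s:Int) < (L.length : Int)) ∧
              PySem.List.pyGetD L (s : Int) "" ≠ "") := by
            refine ⟨⟨hne, by exact_mod_cast hs⟩, by rw [hget]; exact hv⟩
          rw [if_pos this, hget]
          simp [inter, iOpt, hv]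
      · have hcond : ¬ (((s:Int) ≠ n - 1 ∧ (s:Int) < (L.length : Int)) ∧
            PySem.List.pyGetD L (s : Int) "" ≠ "") := by
          intro h; exact absurd (by exact_mod_cast h.1.2) hs
        have h1 : L.drop s = [] := List.drop_eq_nil_of_le (by omega)
        have h2 : L.drop (s + 1) = [] := List.drop_eq_nil_of_le (by omega)
        rw [if_neg hcond, h1, h2]
        simp [inter]

/-- A's result is `inter`. -/
theorem A_eq_inter (images : List String) (parts : List String) :
    ((PySem.List.enumerate parts).foldl
      (fun segs ip =>
        let i := ip.1
        let part := PySem.Str.strip ip.2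
        let segs := if part ≠ "" then segs ++ [[("type", "text"), ("value", part)]] else segs
        if i ≠ (parts.length : Int) - 1 ∧ i < (images.length : Int) then
          segs ++ [[("type", "image"), ("value", PySem.List.pyGetD images i "")]]
        else segs) []).filter (fun s => ((List.lookup "value" s).getD "") ≠ "") =
    inter parts images := by
  have hbody : (fun (segs : List (List (String × String))) (ip : Int × String) =>
      let i := ip.1
      let part := PySem.Str.strip ip.2
      let segs := if part ≠ "" then segs ++ [[("type", "text"), ("value", part)]] else segs
      if i ≠ (parts.length : Int) - 1 ∧ i < (images.length : Int) then
        segs ++ [[("type", "image"), ("value", PySem.List.pyGetD images i "")]]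
      else segs) =
      (fun segs ip => segs ++
        ((if PySem.Str.strip ip.2 ≠ "" then [tDict (PySem.Str.strip ip.2)] else []) ++
         (if ip.1 ≠ (parts.length : Int) - 1 ∧ ip.1 < (images.length : Int) then
            [iDict (PySem.List.pyGetD images ip.1 "")] else []))) := by
    funext segs ip
    simp only [tDict, iDict]
    split_ifs <;> simp_all
  rw [hbody, PySem.List.foldl_append_eq_flatMap, List.nil_append, List.filter_flatMap]
  have : ∀ ip : Int × String,
      (((if PySem.Str.strip ip.2 ≠ "" then [tDict (PySem.Str.strip ip.2)] else []) ++
        (if ip.1 ≠ (parts.length : Int) - 1 ∧ ip.1 < (images.length : Int) then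
           [iDict (PySem.List.pyGetD images ip.1 "")] else [])).filter
        (fun s => ((List.lookup "value" s).getD "") ≠ "")) =
      tOpt ip.2 ++
        (if (ip.1 ≠ (parts.length : Int) - 1 ∧ ip.1 < (images.length : Int)) ∧
            PySem.List.pyGetD images ip.1 "" ≠ "" then
          [iDict (PySem.List.pyGetD images ip.1 "")] else []) := by
    intro ip
    rw [List.filter_append, filter_value_tOpt, filter_value_iOpt]
  simp only [this]
  rw [show (PySem.List.enumerate parts) = PySem.List.enumerate parts ((0 : Nat) : Int) from rfl]
  exact enum_inter images parts 0 (parts.length : Int) (by simp)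

/-- the per-token effect of B's deferred filter+map on a text token -/
theorem tok_text (p : String) :
    ((([(("text" : String), p)]).filter
        (fun tv => (if tv.1 == "text" then PySem.Str.strip tv.2 else tv.2) ≠ "")).map
      (fun tv => [("type", tv.1), ("value", if tv.1 == "text" then PySem.Str.strip tv.2 else tv.2)])) =
    tOpt p := by
  by_cases h : PySem.Str.strip p = "" <;>
    simp [tOpt, tDict, List.filter, h]

/-- the per-token effect of B's deferred filter+map on an image token -/
theorem tok_image (l : String) :
    ((([(("image" : String), l)]).filter
        (fun tv => (if tv.1 == "text" then PySem.Str.strip tv.2 else tv.2) ≠ "")).map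
      (fun tv => [("type", tv.1), ("value", if tv.1 == "text" then PySem.Str.strip tv.2 else tv.2)])) =
    iOpt l := by
  by_cases h : l = "" <;>
    simp [iOpt, iDict, List.filter, h]

/-- B's result is `inter`: filter+map over the raw token stream. -/
theorem B_eq_inter : ∀ (parts images : List String),
    ((bmIleave parts images).filter
        (fun tv => (if tv.1 == "text" then PySem.Str.strip tv.2 else tv.2) ≠ "")).map
      (fun tv => [("type", tv.1), ("value", if tv.1 == "text" then PySem.Str.strip tv.2 else tv.2)]) =
    inter parts images := by
  intro parts
  induction parts with
  | nil => intro images; simp [bmIleave, inter]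
  | cons p ps ih =>
    intro images
    cases ps with
    | nil =>
      have := tok_text p
      simpa [bmIleave, inter] using this
    | cons q ps' =>
      cases images with
      | nil =>
        have : bmIleave (p :: q :: ps') [] = ("text", p) :: bmIleave (q :: ps') [] := rfl
        rw [this, show (("text", p) :: bmIleave (q :: ps') []) =
          [(("text" : String), p)] ++ bmIleave (q :: ps') [] from rfl,
          List.filter_append, List.map_append, tok_text, ih []]
        simp [inter]
      | cons l ls =>
        have : bmIleave (p :: q :: ps') (l :: ls) =
            [(("text" : String), p)] ++ [(("image" : String), l)] ++ bmIleave (q :: ps') ls := rfl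
        rw [this, List.filter_append, List.filter_append, List.map_append, List.map_append,
          tok_text, tok_image, ih ls]
        simp [inter]

-- ===== VERDICT (by name: the statement is the Claim_ definition above) =====
theorem build_msgs_spec : Claim_equal_build_msgs := by
  intro tgt_path prompt _
  unfold Spec_build_msgs build_msgs build_msgs_alt
  rw [A_eq_inter tgt_path ((PySem.Str.split? prompt "<image>").getD []),
    B_eq_inter ((PySem.Str.split? prompt "<image>").getD []) tgt_path]
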